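-- pv_equiv track=rewrite | github.com/315264757/Taller-de-Herramientas-Computacionales | Clases/Programas/Tarea05/Problema1_2.py | pasos
-- ===== SOURCE A (Python) =====
-- def pasos(a,b):
--     L = []
--     r = a%b
--     while r != 0:
--         a = b
--         b = r
--         r = a%b
--         L.append(b)
--     return(L)
-- ===== SOURCE B (Python) =====
-- def pasos(a, b):
--     r = a % b
--     if r == 0:
--         return []
--     return [r] + pasos(b, r)
-- ===== Notes on version B (the rewrite author's own statement) =====
-- stated objective: simpler
-- what changed: Replaces the while-loop with mutable a/b/r/L state by direct recursion on the gcd recurrence: return [] when a%b==0, else [r] + pasos(b, r); no explicit list accumulator or loop variables.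
import Mathlib
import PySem

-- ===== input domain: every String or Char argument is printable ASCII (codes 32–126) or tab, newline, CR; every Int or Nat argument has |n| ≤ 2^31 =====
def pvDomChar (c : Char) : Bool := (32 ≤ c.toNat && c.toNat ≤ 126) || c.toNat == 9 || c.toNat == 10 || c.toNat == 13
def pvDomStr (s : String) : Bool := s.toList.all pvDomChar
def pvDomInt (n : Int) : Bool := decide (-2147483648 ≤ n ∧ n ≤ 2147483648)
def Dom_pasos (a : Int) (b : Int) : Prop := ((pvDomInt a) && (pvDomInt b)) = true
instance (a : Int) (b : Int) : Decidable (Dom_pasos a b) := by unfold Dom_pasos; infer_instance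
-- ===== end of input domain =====

-- B is a direct recursion on the gcd recurrence instead of A's while-loop with mutable a/b/r and a list accumulator.

-- termination fact both ports cite: Python's % strictly shrinks |r|
theorem pvMod_natAbs_lt (b r : Int) (h : r ≠ 0) : (PySem.Int.mod b r).natAbs < r.natAbs := by
  rcases lt_trichotomy r 0 with hr | hr | hr
  · have := PySem.Int.mod_neg_bounds b hr
    omega
  · exact absurd hr h
  · have h1 := PySem.Int.mod_nonneg b hr
    have h2 := PySem.Int.mod_lt b hr
    omega

-- ===== PORT A =====
-- loop state: current divisor pair (b, r) and accumulator L; a's role is only as the previous b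
def pasosLoop (b r : Int) (L : List Int) : List Int :=
  if _h : r = 0 then L
  else pasosLoop r (PySem.Int.mod b r) (L ++ [r])
termination_by r.natAbs
decreasing_by exact pvMod_natAbs_lt b r _h

def pasos (a : Int) (b : Int) : List Int :=
  pasosLoop b (PySem.Int.mod a b) []

-- ===== PORT B =====
def pasos_alt (a : Int) (b : Int) : List Int :=
  let r := PySem.Int.mod a b
  if _h : r = 0 then []
  else r :: pasos_alt b r
termination_by (PySem.Int.mod a b).natAbs
decreasing_by exact pvMod_natAbs_lt b (PySem.Int.mod a b) _h

-- ===== PRECONDITION & SPEC =====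
-- Pre_ excludes b = 0, where Python A raises ZeroDivisionError
def Pre_pasos (a : Int) (b : Int) : Prop := b ≠ 0
instance (a : Int) (b : Int) : Decidable (Pre_pasos a b) := by unfold Pre_pasos; infer_instance
def pvWitness_pasos : Int × Int := (48, 18)

def Spec_pasos (a : Int) (b : Int) (out : List Int) : Prop := out = pasos_alt a b
instance (a : Int) (b : Int) (out : List Int) : Decidable (Spec_pasos a b out) := by unfold Spec_pasos; infer_instance

-- ===== CLAIM (what is proved, stated in full; the proofs are below) =====
def Claim_equal_pasos : Prop := ∀ (a : Int) (b : Int), Dom_pasos a b → Pre_pasos a b → Spec_pasos a b (pasos a b)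

-- ===== LEMMAS AND PROOFS =====
theorem pasosLoop_eq (b r : Int) (L : List Int) :
    pasosLoop b r L = L ++ (if r = 0 then [] else r :: pasos_alt b r) := by
  induction b, r, L using pasosLoop.induct with
  | case1 h => simp [pasosLoop, *]
  | case2 b r L h ih =>
    rw [pasosLoop, dif_neg h, ih, if_neg h]
    conv_rhs => rw [pasos_alt]
    simp

-- ===== VERDICT (by name: the statement is the Claim_ definition above) =====
theorem pasos_spec : Claim_equal_pasos := by
  intro a b _ _hb
  unfold Spec_pasos pasos
  rw [pasosLoop_eq]
  conv_rhs => rw [pasos_alt]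
  simp
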